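-- pv_equiv track=rewrite | github.com/syeongkim/Algorithm | 프로그래머스/0/120896. 한 번만 등장한 문자/한 번만 등장한 문자.py | solution
-- ===== SOURCE A (Python) =====
-- def solution(s):
--     answer = []
--     dic = {}
--
--     for i in s:
--         if i in dic:
--             dic[i] += 1
--         else:
--             dic[i] = 1
--
--     for i in dic:
--         if dic[i] == 1:
--             answer.append(i)
--
--     answer = sorted(answer)
--     return ''.join(answer)
-- ===== SOURCE B (Python) =====
-- def solution(s):
--     t = sorted(s)
--     out = []
--     n = len(t)
--     i = 0
--     while i < n:
--         j = i + 1
--         while j < n and t[j] == t[i]: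
--             j += 1
--         if j == i + 1:
--             out.append(t[i])
--         i = j
--     return ''.join(out)
-- ===== Notes on version B (the rewrite author's own statement) =====
-- stated objective: alternative
-- what changed: Replaces the frequency dict + filter + sort with sorting the characters first and a single run-length scan over the sorted list that emits each run of length exactly 1, already in order.
import Mathlib
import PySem

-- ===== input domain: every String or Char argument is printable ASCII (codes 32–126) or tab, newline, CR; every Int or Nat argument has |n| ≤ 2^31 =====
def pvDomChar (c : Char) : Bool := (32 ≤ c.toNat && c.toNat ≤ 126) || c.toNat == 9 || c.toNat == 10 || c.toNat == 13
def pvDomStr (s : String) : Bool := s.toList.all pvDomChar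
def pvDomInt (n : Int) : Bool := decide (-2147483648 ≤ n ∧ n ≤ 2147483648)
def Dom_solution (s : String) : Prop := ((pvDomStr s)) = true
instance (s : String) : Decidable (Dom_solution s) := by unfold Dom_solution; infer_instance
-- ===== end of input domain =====

-- B changes the algorithm: instead of a frequency dict filtered and sorted, B sorts the
-- characters first and does one run-length scan emitting runs of length exactly 1 (same cost).

-- ===== PORT A =====
def solution (s : String) : String :=
  -- answer = []; dic = {}
  -- for i in s: if i in dic: dic[i] += 1 else: dic[i] = 1
  let dic := s.toList.foldl
    (fun d i => if d.contains i then d.insert i (d.getD i 0 + 1) else d.insert i (1 : Int))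
    PySem.Dict.empty
  -- for i in dic: if dic[i] == 1: answer.append(i)
  let answer := dic.keys.foldl (fun acc i => if dic.getD i 0 = 1 then acc ++ [i] else acc) []
  -- answer = sorted(answer); return ''.join(answer)
  String.mk (PySem.List.sorted answer (fun x => x) false)

-- ===== PORT B =====
-- the outer while loop over the sorted characters: each step consumes one whole run
def runScan : List Char → List Char
  | [] => []
  | c :: rest =>
    -- inner while: j advances over the copies of t[i]; i = j consumes the run
    if rest.takeWhile (· == c) = [] then c :: runScan (rest.dropWhile (· == c))
    else runScan (rest.dropWhile (· == c))
termination_by t => t.length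
decreasing_by
  all_goals
    simp only [List.length_cons]
    have := (List.dropWhile_sublist (l := rest) (p := (· == c))).length_le
    omega

def solution_alt (s : String) : String :=
  String.mk (runScan (PySem.List.sorted s.toList (fun x => x) false))

-- ===== PRECONDITION & SPEC =====
def Spec_solution (s : String) (out : String) : Prop := out = solution_alt s
instance (s : String) (out : String) : Decidable (Spec_solution s out) := by unfold Spec_solution; infer_instance

-- ===== CLAIM (what is proved, stated in full; the proofs are below) =====
def Claim_equal_solution : Prop := ∀ (s : String), Dom_solution s → Spec_solution s (solution s)

-- ===== LEMMAS AND PROOFS =====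

-- everything runScan returns comes from its input
theorem runScan_subset (t : List Char) : ∀ x ∈ runScan t, x ∈ t := by
  induction t using runScan.induct with
  | case1 => simp [runScan]
  | case2 c rest hif ih =>
    intro x hx
    rw [runScan, if_pos hif] at hx
    rcases List.mem_cons.1 hx with h | h
    · simp [h]
    · exact List.mem_cons_of_mem _ ((List.dropWhile_sublist _).mem (ih x h))
  | case3 c rest hif ih =>
    intro x hx
    rw [runScan, if_neg hif] at hx
    exact List.mem_cons_of_mem _ ((List.dropWhile_sublist _).mem (ih x hx))

-- after dropping the leading copies of c from a sorted tail whose elements dominate c,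
-- every remaining element is strictly above c
theorem dropWhile_gt (c : Char) :
    ∀ (rest : List Char), rest.Pairwise (· ≤ ·) → (∀ x ∈ rest, c ≤ x) →
      ∀ x ∈ rest.dropWhile (· == c), c < x := by
  intro rest
  induction rest with
  | nil => simp
  | cons a r ih =>
    intro hp hle x hx
    by_cases hac : a = c
    · rw [List.dropWhile_cons_of_pos (by simp [hac])] at hx
      exact ih (List.pairwise_cons.1 hp).2 (fun y hy => hle y (List.mem_cons_of_mem _ hy)) x hx
    · rw [List.dropWhile_cons_of_neg (by simp [hac])] at hx
      have hca : c < a := lt_of_le_of_ne (hle a (by simp)) (fun h => hac h.symm)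
      rcases List.mem_cons.1 hx with h | h
      · exact h ▸ hca
      · exact lt_of_lt_of_le hca ((List.pairwise_cons.1 hp).1 x h)

-- membership in runScan of a sorted list = having count exactly 1
theorem runScan_mem (t : List Char) (hs : t.Pairwise (· ≤ ·)) :
    ∀ x, x ∈ runScan t ↔ t.count x = 1 := by
  induction t using runScan.induct with
  | case1 => simp [runScan]
  | case2 c rest hif ih =>
    intro x
    have hp := List.pairwise_cons.1 hs
    have hgt : ∀ y ∈ rest.dropWhile (· == c), c < y := dropWhile_gt c rest hp.2 hp.1
    have hsort' : (rest.dropWhile (· == c)).Pairwise (· ≤ ·) := hp.2.sublist (List.dropWhile_sublist _)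
    have hsplit : rest.takeWhile (· == c) ++ rest.dropWhile (· == c) = rest := List.takeWhile_append_dropWhile
    have hruncnt : ∀ y ∈ rest.takeWhile (· == c), y = c := by
      intro y hy
      simpa using List.mem_takeWhile_imp hy
    have ihx := ih hsort'
    rw [runScan, if_pos hif]
    have hrun0 : rest.takeWhile (· == c) = [] := hif
    have hrest_eq : rest = rest.dropWhile (· == c) := by conv_lhs => rw [← hsplit, hrun0]; simp
    constructor
    · intro hx
      rcases List.mem_cons.1 hx with h | h
      · subst h
        rw [List.count_cons_self]
        have : rest.count x = 0 := by
          rw [hrest_eq]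
          exact List.count_eq_zero.2 (fun hmem => lt_irrefl x (hgt x hmem))
        omega
      · have hx1 := (ihx x).1 h
        have hxne : x ≠ c := by
          have := hgt x (runScan_subset _ x h)
          exact fun he => absurd (he ▸ this) (lt_irrefl c)
        rw [List.count_cons_of_ne hxne.symm, hrest_eq]
        exact hx1
    · intro hcnt
      by_cases hxc : x = c
      · exact List.mem_cons.2 (Or.inl hxc)
      · rw [List.count_cons_of_ne (Ne.symm hxc), hrest_eq] at hcnt
        exact List.mem_cons_of_mem _ ((ihx x).2 hcnt)
  | case3 c rest hif ih =>
    intro x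
    have hp := List.pairwise_cons.1 hs
    have hgt : ∀ y ∈ rest.dropWhile (· == c), c < y := dropWhile_gt c rest hp.2 hp.1
    have hsort' : (rest.dropWhile (· == c)).Pairwise (· ≤ ·) := hp.2.sublist (List.dropWhile_sublist _)
    have hsplit : rest.takeWhile (· == c) ++ rest.dropWhile (· == c) = rest := List.takeWhile_append_dropWhile
    have hruncnt : ∀ y ∈ rest.takeWhile (· == c), y = c := by
      intro y hy
      simpa using List.mem_takeWhile_imp hy
    have ihx := ih hsort'
    rw [runScan, if_neg hif]
    constructor
    · intro hx
      have hx1 := (ihx x).1 hx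
      have hxne : x ≠ c := by
        have := hgt x (runScan_subset _ x hx)
        exact fun he => absurd (he ▸ this) (lt_irrefl c)
      rw [List.count_cons_of_ne hxne.symm, ← hsplit, List.count_append,
        List.count_eq_zero.2 (fun hmem => hxne (hruncnt x hmem))]
      omega
    · intro hcnt
      by_cases hxc : x = c
      · exfalso
        subst hxc
        rw [List.count_cons_self, ← hsplit, List.count_append] at hcnt
        have hlen : (rest.takeWhile (· == x)).count x = (rest.takeWhile (· == x)).length :=
          List.count_eq_length.2 (fun y hy => ((hruncnt y hy).symm ▸ rfl))
        have hpos : 0 < (rest.takeWhile (· == x)).length :=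
          List.length_pos_iff.2 hif
        have h0 : (rest.dropWhile (· == x)).count x = 0 :=
          List.count_eq_zero.2 (fun hmem => lt_irrefl x (hgt x hmem))
        omega
      · rw [List.count_cons_of_ne (Ne.symm hxc), ← hsplit, List.count_append,
          List.count_eq_zero.2 (fun hmem => hxc (hruncnt x hmem))] at hcnt
        exact (ihx x).2 (by omega)

-- runScan of a sorted list is strictly increasing
theorem runScan_pairwise (t : List Char) (hs : t.Pairwise (· ≤ ·)) :
    (runScan t).Pairwise (· < ·) := by
  induction t using runScan.induct with
  | case1 => simp [runScan]
  | case2 c rest hif ih =>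
    have hp := List.pairwise_cons.1 hs
    have hgt : ∀ y ∈ rest.dropWhile (· == c), c < y := dropWhile_gt c rest hp.2 hp.1
    have hsort' : (rest.dropWhile (· == c)).Pairwise (· ≤ ·) := hp.2.sublist (List.dropWhile_sublist _)
    rw [runScan, if_pos hif]
    exact List.pairwise_cons.2 ⟨fun y hy => hgt y (runScan_subset _ y hy), ih hsort'⟩
  | case3 c rest hif ih =>
    have hp := List.pairwise_cons.1 hs
    have hsort' : (rest.dropWhile (· == c)).Pairwise (· ≤ ·) := hp.2.sublist (List.dropWhile_sublist _)
    rw [runScan, if_neg hif]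
    exact ih hsort'

-- A's counting loop is the canonical counter
theorem foldA_eq_counter (l : List Char) :
    l.foldl (fun d i => if d.contains i then d.insert i (d.getD i 0 + 1) else d.insert i (1 : Int))
      PySem.Dict.empty = PySem.Dict.counter l := by
  have hstep : (fun (d : PySem.Dict Char Int) i =>
      if d.contains i then d.insert i (d.getD i 0 + 1) else d.insert i (1 : Int)) =
      fun d i => d.insert i (d.getD i 0 + 1) := by
    funext d i
    by_cases h : d.contains i
    · rw [if_pos h]
    · rw [if_neg h]
      have hz : d.getD i 0 = 0 := by
        rcases ho : d.get? i with _ | v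
        · simp [PySem.Dict.getD, ho]
        · exact absurd (by rw [PySem.Dict.contains_eq_isSome_get?, ho]; rfl) h
      rw [hz]
      norm_num
  rw [hstep]
  exact PySem.Dict.foldl_insert_getD_add_one_eq_counter l

theorem solution_eq (s : String) : solution s = solution_alt s := by
  unfold solution solution_alt
  simp only [foldA_eq_counter, PySem.List.foldl_append_ite_eq_filter, List.nil_append,
    PySem.Dict.keys_counter, ← PySem.List.dedup_eq_ofList]
  set l := s.toList
  have hcnt : ∀ c : Char, (PySem.Dict.counter l).getD c 0 = (l.count c : Int) := fun c =>
    PySem.Dict.getD_counter l c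
  have hsorted : (PySem.List.sorted l (fun x => x) false).Pairwise (· ≤ ·) := by
    simpa using PySem.List.sorted_pairwise l (fun x => x)
  set t := PySem.List.sorted l (fun x => x) false with ht
  have hperm : t.Perm l := PySem.List.sorted_perm l (fun x => x) false
  -- the filtered dedup list and runScan t are both Nodup with the same members
  have hmemA : ∀ c, c ∈ (PySem.List.dedup l).filter (fun i => decide ((PySem.Dict.counter l).getD i 0 = 1)) ↔
      l.count c = 1 := by
    intro c
    rw [List.mem_filter, PySem.List.mem_dedup]
    constructor
    · intro ⟨_, h2⟩
      have := of_decide_eq_true h2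
      rw [hcnt c] at this
      exact_mod_cast this
    · intro h
      refine ⟨List.count_pos_iff.1 (by omega), ?_⟩
      rw [decide_eq_true_iff, hcnt c]
      exact_mod_cast h
  have hmemB : ∀ c, c ∈ runScan t ↔ l.count c = 1 := by
    intro c
    rw [runScan_mem t hsorted c, hperm.count_eq]
  have hnodupA : ((PySem.List.dedup l).filter (fun i => decide ((PySem.Dict.counter l).getD i 0 = 1))).Nodup :=
    (PySem.List.nodup_dedup l).filter _
  have hnodupB : (runScan t).Nodup := (runScan_pairwise t hsorted).imp ne_of_lt
  have hperm2 : (runScan t).Perm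
      ((PySem.List.dedup l).filter (fun i => decide ((PySem.Dict.counter l).getD i 0 = 1))) := by
    rw [List.perm_ext_iff_of_nodup hnodupB hnodupA]
    intro a
    rw [hmemA a, hmemB a]
  congr 1
  exact PySem.List.sorted_eq_of_perm_of_pairwise_lt _ _ _ hperm2
    (by simpa using runScan_pairwise t hsorted)

-- ===== VERDICT (by name: the statement is the Claim_ definition above) =====
theorem solution_spec : Claim_equal_solution := by
  intro s _
  exact solution_eq s
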